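-- pv_equiv track=rewrite | github.com/bartserafin/cs50P2022 | week5/pset5/test_plates/plates.py | numbers_at_end
-- ===== SOURCE A (Python) =====
-- def numbers_at_end(s):
--     number_found = False
--
--     for char in s:
--         if char.isalpha() and number_found == True:
--             return False
--         elif char.isnumeric():
--             number_found = True
--     else:
--         return True
-- ===== SOURCE B (Python) =====
-- def numbers_at_end(s):
--     idx = next((i for i, c in enumerate(s) if c.isnumeric()), None)
--     if idx is None:
--         return True
--     return not any(c.isalpha() for c in s[idx + 1:])
-- ===== Notes on version B (the rewrite author's own statement) =====
-- stated objective: alternative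
-- what changed: Replaces the flag-threaded single pass with a locate-then-check decomposition: find the index of the first numeric character, then verify the suffix after it contains no letters.
import Mathlib
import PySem

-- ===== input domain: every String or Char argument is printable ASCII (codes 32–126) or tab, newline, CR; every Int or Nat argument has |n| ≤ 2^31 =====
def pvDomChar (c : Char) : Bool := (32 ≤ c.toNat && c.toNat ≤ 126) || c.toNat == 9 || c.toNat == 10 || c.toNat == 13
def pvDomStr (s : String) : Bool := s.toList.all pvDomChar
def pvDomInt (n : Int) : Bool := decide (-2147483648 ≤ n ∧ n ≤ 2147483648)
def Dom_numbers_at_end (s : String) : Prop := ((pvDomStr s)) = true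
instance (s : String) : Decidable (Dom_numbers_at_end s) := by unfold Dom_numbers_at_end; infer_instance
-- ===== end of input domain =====

-- ===== PORT A =====
-- loop with a number_found flag; isnumeric ported as PySem.Chars.isdigit (exact on the printable-ASCII domain)
def numbersAtEndLoop : List Char → Bool → Bool
  | [], _ => true
  | c :: cs, numberFound =>
    if PySem.Chars.isalpha c && numberFound then false
    else if PySem.Chars.isdigit c then numbersAtEndLoop cs true
    else numbersAtEndLoop cs numberFound

def numbers_at_end (s : String) : Bool := numbersAtEndLoop s.toList false

-- ===== PORT B =====
-- B: index of the first numeric char (next over enumerate ported as List.findIdx?), then check the suffix s[idx+1:] has no letters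
def numbers_at_end_alt (s : String) : Bool :=
  match s.toList.findIdx? PySem.Chars.isdigit with
  | none => true
  | some i => !(s.toList.drop (i + 1)).any PySem.Chars.isalpha

-- ===== PRECONDITION & SPEC =====
def Spec_numbers_at_end (s : String) (out : Bool) : Prop := out = numbers_at_end_alt s
instance (s : String) (out : Bool) : Decidable (Spec_numbers_at_end s out) := by unfold Spec_numbers_at_end; infer_instance

-- ===== CLAIM (what is proved, stated in full; the proofs are below) =====
def Claim_equal_numbers_at_end : Prop := ∀ (s : String), Dom_numbers_at_end s → Spec_numbers_at_end s (numbers_at_end s)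

-- ===== LEMMAS AND PROOFS =====

-- ===== VERDICT (by name: the statement is the Claim_ definition above) =====
-- once the flag is set, A returns true iff no letter remains
theorem loop_true_eq (cs : List Char) :
    numbersAtEndLoop cs true = !cs.any PySem.Chars.isalpha := by
  induction cs with
  | nil => rfl
  | cons c cs ih =>
    simp only [numbersAtEndLoop, List.any_cons]
    by_cases h : PySem.Chars.isalpha c <;> simp [h, ih]

-- the flag-threaded loop equals the locate-then-check form
theorem loop_false_eq (cs : List Char) :
    numbersAtEndLoop cs false =
      (match cs.findIdx? PySem.Chars.isdigit with
       | none => true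
       | some i => !(cs.drop (i + 1)).any PySem.Chars.isalpha) := by
  induction cs with
  | nil => rfl
  | cons c cs ih =>
    simp only [numbersAtEndLoop, List.findIdx?_cons]
    by_cases h : PySem.Chars.isdigit c
    · simp [h, loop_true_eq]
    · simp only [h, Bool.and_false, if_false]
      rw [ih]
      cases cs.findIdx? PySem.Chars.isdigit <;> simp

theorem numbers_at_end_spec : Claim_equal_numbers_at_end := by
  intro s _
  show numbers_at_end s = numbers_at_end_alt s
  simp only [numbers_at_end, numbers_at_end_alt, loop_false_eq]
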